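-- pv_equiv track=rewrite | github.com/Br1m4zz/ProAnalyzer | python_inference/CalibrateData.py | pos_sensitivity
-- ===== SOURCE A (Python) =====
-- def pos_sensitivity(non, lbf, fbf, add, sub):
--     """
--     计算每个位置的敏感度（四种算子差异计数）
--     参数：
--         non_cf: 基准序列 [int]
--         lbf_cf: LBF算子序列 [int]
--         fbf_cf: FBF算子序列 [int]
--         add_cf: ADD算子序列 [int]
--         sub_cf: SUB算子序列 [int]
--     返回：
--         sensitivity: 每个位置的差异计数列表 [int]
--     """
--     assert len({len(non), len(lbf), len(fbf), len(add), len(sub)}) == 1, "所有序列长度必须一致"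
--
--     return [
--         sum([  # 统计该位置四种算子的差异总数
--             int(lbf[i] != non[i]),
--             int(fbf[i] != non[i]),
--             int(add[i] != non[i]),
--             int(sub[i] != non[i])
--         ])
--         for i in range(len(non))
--     ]
-- ===== SOURCE B (Python) =====
-- def pos_sensitivity(non, lbf, fbf, add, sub):
--     assert len({len(non), len(lbf), len(fbf), len(add), len(sub)}) == 1, "所有序列长度必须一致"
--     result = [0] * len(non)
--     for seq in (lbf, fbf, add, sub):
--         result = [r + int(x != y) for r, (x, y) in zip(result, zip(seq, non))]
--     return result
-- ===== Notes on version B (the rewrite author's own statement) =====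
-- stated objective: alternative
-- what changed: Operator-first accumulation: start from a zero vector and fold the four operator sequences into it with a zipped pass per operator, instead of one per-position comprehension summing four indexed terms.
import Mathlib
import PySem

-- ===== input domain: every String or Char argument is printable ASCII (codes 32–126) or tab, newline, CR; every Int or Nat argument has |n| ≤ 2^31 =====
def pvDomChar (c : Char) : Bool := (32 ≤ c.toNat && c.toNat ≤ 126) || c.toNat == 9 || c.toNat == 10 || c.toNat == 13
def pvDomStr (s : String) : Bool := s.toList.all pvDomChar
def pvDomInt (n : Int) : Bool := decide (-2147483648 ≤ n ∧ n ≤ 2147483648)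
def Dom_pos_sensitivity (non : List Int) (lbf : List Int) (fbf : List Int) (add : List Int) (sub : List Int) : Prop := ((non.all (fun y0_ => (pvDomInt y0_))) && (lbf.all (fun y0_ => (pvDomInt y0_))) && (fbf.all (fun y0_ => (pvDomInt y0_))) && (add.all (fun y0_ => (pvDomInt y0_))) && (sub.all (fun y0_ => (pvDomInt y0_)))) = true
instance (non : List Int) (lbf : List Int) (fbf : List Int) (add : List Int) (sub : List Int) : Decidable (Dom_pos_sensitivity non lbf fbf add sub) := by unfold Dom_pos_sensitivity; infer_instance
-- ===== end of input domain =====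

-- B accumulates the four operator differences into a zero vector, one zipped pass per operator,
-- instead of A's single per-position comprehension summing four indexed terms (alternative decomposition, same cost).


-- ===== PORT A =====
-- Python A: one comprehension over range(len(non)), each element sum([...]) of the four 0/1 diffs.
def pos_sensitivity (non : List Int) (lbf : List Int) (fbf : List Int) (add : List Int) (sub : List Int) : List Int :=
  (PySem.List.pyRange 0 (non.length : Int) 1).map (fun i =>
    [(if PySem.List.pyGetD lbf i 0 ≠ PySem.List.pyGetD non i 0 then (1 : Int) else 0),
     (if PySem.List.pyGetD fbf i 0 ≠ PySem.List.pyGetD non i 0 then (1 : Int) else 0),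
     (if PySem.List.pyGetD add i 0 ≠ PySem.List.pyGetD non i 0 then (1 : Int) else 0),
     (if PySem.List.pyGetD sub i 0 ≠ PySem.List.pyGetD non i 0 then (1 : Int) else 0)].sum)

-- ===== PORT B =====
-- one pass of B's loop body: result = [r + int(x != y) for r, (x, y) in zip(result, zip(seq, non))]
def pvStep (non : List Int) (res : List Int) (seq : List Int) : List Int :=
  (res.zip (seq.zip non)).map (fun p => p.1 + (if p.2.1 ≠ p.2.2 then (1 : Int) else 0))

def pos_sensitivity_alt (non : List Int) (lbf : List Int) (fbf : List Int) (add : List Int) (sub : List Int) : List Int :=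
  [lbf, fbf, add, sub].foldl (pvStep non) (List.replicate non.length 0)

-- ===== PRECONDITION & SPEC =====
-- Pre_ excludes exactly the inputs where A's assert fails (AssertionError): all five lengths equal.
def Pre_pos_sensitivity (non : List Int) (lbf : List Int) (fbf : List Int) (add : List Int) (sub : List Int) : Prop :=
  lbf.length = non.length ∧ fbf.length = non.length ∧ add.length = non.length ∧ sub.length = non.length
instance (non : List Int) (lbf : List Int) (fbf : List Int) (add : List Int) (sub : List Int) : Decidable (Pre_pos_sensitivity non lbf fbf add sub) := by unfold Pre_pos_sensitivity; infer_instance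

def pvWitness_pos_sensitivity : List Int × List Int × List Int × List Int × List Int :=
  ([1, 2], [1, 3], [0, 2], [1, 2], [5, 5])

def Spec_pos_sensitivity (non : List Int) (lbf : List Int) (fbf : List Int) (add : List Int) (sub : List Int) (out : List Int) : Prop := out = pos_sensitivity_alt non lbf fbf add sub
instance (non : List Int) (lbf : List Int) (fbf : List Int) (add : List Int) (sub : List Int) (out : List Int) : Decidable (Spec_pos_sensitivity non lbf fbf add sub out) := by unfold Spec_pos_sensitivity; infer_instance

-- ===== CLAIM (what is proved, stated in full; the proofs are below) =====
def Claim_equal_pos_sensitivity : Prop := ∀ (non : List Int) (lbf : List Int) (fbf : List Int) (add : List Int) (sub : List Int), Dom_pos_sensitivity non lbf fbf add sub → Pre_pos_sensitivity non lbf fbf add sub → Spec_pos_sensitivity non lbf fbf add sub (pos_sensitivity non lbf fbf add sub)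

-- ===== LEMMAS AND PROOFS =====

theorem pvStep_length (non res seq : List Int) (h1 : res.length = non.length)
    (h2 : seq.length = non.length) : (pvStep non res seq).length = non.length := by
  simp [pvStep, h1, h2]

theorem pvStep_getElem (non res seq : List Int) (h1 : res.length = non.length)
    (h2 : seq.length = non.length) (k : Nat) (hk : k < non.length) :
    (pvStep non res seq)[k]'(by rw [pvStep_length non res seq h1 h2]; exact hk) =
      res[k]'(by omega) + (if seq[k]'(by omega) ≠ non[k] then (1 : Int) else 0) := by
  simp [pvStep]

theorem pos_sensitivity_spec : Claim_equal_pos_sensitivity := by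
  intro non lbf fbf add sub _ hpre
  obtain ⟨h1, h2, h3, h4⟩ := hpre
  unfold Spec_pos_sensitivity pos_sensitivity pos_sensitivity_alt
  simp only [List.foldl]
  have l0 : (List.replicate non.length (0 : Int)).length = non.length := by simp
  have l1 := pvStep_length non _ lbf l0 h1
  have l2 := pvStep_length non _ fbf l1 h2
  have l3 := pvStep_length non _ add l2 h3
  have l4 := pvStep_length non _ sub l3 h4
  apply List.ext_getElem
  · simpa [PySem.List.length_pyRange_one] using l4.symm
  · intro k hA hB
    have hk : k < non.length := by
      simpa [PySem.List.length_pyRange_one] using hA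
    rw [List.getElem_map, PySem.List.getElem_pyRange_one]
    rw [pvStep_getElem non _ sub l3 h4 k hk, pvStep_getElem non _ add l2 h3 k hk,
        pvStep_getElem non _ fbf l1 h2 k hk, pvStep_getElem non _ lbf l0 h1 k hk]
    have gl : PySem.List.pyGetD lbf ((0 : Int) + (k : Int)) 0 = lbf[k]'(by omega) := by
      rw [zero_add, PySem.List.pyGetD_natCast]; exact List.getD_eq_getElem _ _ (by omega)
    have gf : PySem.List.pyGetD fbf ((0 : Int) + (k : Int)) 0 = fbf[k]'(by omega) := by
      rw [zero_add, PySem.List.pyGetD_natCast]; exact List.getD_eq_getElem _ _ (by omega)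
    have ga : PySem.List.pyGetD add ((0 : Int) + (k : Int)) 0 = add[k]'(by omega) := by
      rw [zero_add, PySem.List.pyGetD_natCast]; exact List.getD_eq_getElem _ _ (by omega)
    have gs : PySem.List.pyGetD sub ((0 : Int) + (k : Int)) 0 = sub[k]'(by omega) := by
      rw [zero_add, PySem.List.pyGetD_natCast]; exact List.getD_eq_getElem _ _ (by omega)
    have gn : PySem.List.pyGetD non ((0 : Int) + (k : Int)) 0 = non[k] := by
      rw [zero_add, PySem.List.pyGetD_natCast]; exact List.getD_eq_getElem _ _ hk
    rw [gl, gf, ga, gs, gn]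
    simp [List.sum_cons, List.getElem_replicate]
    ring
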